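-- pv_equiv track=rewrite | github.com/yanklio/backend_llm_dsl | src/shared/utils.py | _fix_literal_newlines
-- ===== SOURCE A (Python) =====
-- def _fix_literal_newlines(content: str) -> str:
--     """Convert literal backslash-n at top level to actual newlines.
--
--     Gemini sometimes returns JSON where top-level whitespace uses literal \\n
--     instead of actual newlines or escaped \\n. Also fixes invalid escape sequences.
--
--     Args:
--         content: JSON string with literal \\n sequences
--
--     Returns:
--         Content with literal \\n converted to actual newlines and invalid escapes fixed
--     """
--     result = []
--     i = 0
--     in_string = False
--     prev_was_backslash = False
--
--     while i < len(content):
--         char = content[i]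
--
--         if prev_was_backslash:
--             # This char is escaped
--             if char == "n" and not in_string:
--                 # \n outside string -> actual newline
--                 result[-1] = "\n"  # Replace the backslash
--             elif char == "'":
--                 result[-1] = "'"  # \' -> ' (remove backslash)
--             else:
--                 result.append(char)
--             prev_was_backslash = False
--             i += 1
--             continue
--
--         if char == "\\":
--             prev_was_backslash = True
--             result.append(char)
--             i += 1
--             continue
--
--         if char == '"':
--             in_string = not in_string
--
--         result.append(char)
--         i += 1
--
--     return "".join(result)
-- ===== SOURCE B (Python) =====
-- def _fix_literal_newlines(content: str) -> str:
--     """Staged approach: split on backslash, so escapes sit at piece boundaries;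
--     string-state updates use quote-count parity per piece instead of a char scan."""
--     pieces = content.split("\\")
--     out = [pieces[0]]
--     in_string = pieces[0].count('"') % 2 == 1
--     esc = True  # does the separator before the next piece start an escape?
--     n = len(pieces)
--     for idx in range(1, n):
--         p = pieces[idx]
--         if not esc:
--             out.append(p)
--             in_string ^= p.count('"') % 2 == 1
--             esc = True
--         elif p == "":
--             if idx == n - 1:
--                 out.append("\\")  # trailing lone backslash
--             else:
--                 out.append("\\\\")  # escaped backslash; next separator consumed
--                 esc = False
--         else:
--             c = p[0]
--             if c == "n" and not in_string:
--                 out.append("\n")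
--             elif c == "'":
--                 out.append("'")
--             else:
--                 out.append("\\" + c)
--             rest = p[1:]
--             out.append(rest)
--             in_string ^= rest.count('"') % 2 == 1
--     return "".join(out)
-- ===== Notes on version B (the rewrite author's own statement) =====
-- stated objective: faster
-- what changed: Replaces A's char-by-char Python scan (delayed prev_was_backslash flag with result[-1] back-patching) by a staged algorithm: split the input on backslash so every escape sits at a piece boundary, then fold over the pieces, copying each piece wholesale and updating the in-string state by quote-count parity (str.count) instead of per character.
import Mathlib
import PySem

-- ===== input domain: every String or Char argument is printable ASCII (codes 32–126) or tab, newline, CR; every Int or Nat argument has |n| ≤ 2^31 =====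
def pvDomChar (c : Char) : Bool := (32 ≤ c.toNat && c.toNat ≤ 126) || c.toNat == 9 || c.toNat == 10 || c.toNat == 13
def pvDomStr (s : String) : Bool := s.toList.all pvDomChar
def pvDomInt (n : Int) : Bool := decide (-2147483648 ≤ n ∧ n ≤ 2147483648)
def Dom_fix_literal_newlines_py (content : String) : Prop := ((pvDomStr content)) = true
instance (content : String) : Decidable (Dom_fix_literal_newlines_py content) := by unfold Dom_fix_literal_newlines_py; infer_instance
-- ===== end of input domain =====

-- B replaces A's char-by-char scan (delayed escape flag, result[-1] back-patching) by a staged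
-- algorithm: split on '\' so escapes sit at piece boundaries, fold over the pieces, tracking
-- the in-string state by quote-count parity per piece; objective: alternative decomposition.

-- ===== PORT A =====
-- A's loop: state = (in_string, prev_was_backslash, result); result kept reversed, so
-- Python's result[-1] = x is 'x :: acc.tail' and append is cons.
def fixA_loop (cs : List Char) (inStr prev : Bool) (acc : List Char) : List Char :=
  match cs with
  | [] => acc.reverse
  | c :: rest =>
    if prev then
      if c = 'n' ∧ inStr = false then
        fixA_loop rest inStr false ('\n' :: acc.tail)   -- result[-1] = "\n"
      else if c = '\'' then
        fixA_loop rest inStr false ('\'' :: acc.tail)   -- result[-1] = "'"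
      else
        fixA_loop rest inStr false (c :: acc)
    else if c = '\\' then
      fixA_loop rest inStr true ('\\' :: acc)
    else
      fixA_loop rest (if c = '"' then !inStr else inStr) false (c :: acc)

def fix_literal_newlines_py (content : String) : String :=
  String.ofList (fixA_loop content.toList false false [])

-- ===== PORT B =====
-- B's fold over the pieces of content.split("\\"); esc = does the separator before the
-- current piece start an escape?  in-string state updated by quote-count parity per piece.
def fixB_go (pieces : List (List Char)) (inStr esc : Bool) : List Char :=
  match pieces with
  | [] => []
  | p :: rest =>
    if esc = false then
      p ++ fixB_go rest (xor inStr (p.count '"' % 2 == 1)) true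
    else
      match p with
      | [] =>
        match rest with
        | [] => ['\\']                                   -- trailing lone backslash
        | _ :: _ => '\\' :: '\\' :: fixB_go rest inStr false   -- escaped backslash
      | c :: restP =>
        (if c = 'n' ∧ inStr = false then ['\n']
         else if c = '\'' then ['\'']
         else ['\\', c])
        ++ restP ++ fixB_go rest (xor inStr (restP.count '"' % 2 == 1)) true

def fix_literal_newlines_py_alt (content : String) : String :=
  match content.toList.splitOn '\\' with
  | [] => ""          -- unreachable: splitOn never returns []
  | p0 :: rest => String.ofList (p0 ++ fixB_go rest (p0.count '"' % 2 == 1) true)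

-- ===== PRECONDITION & SPEC =====
def Spec_fix_literal_newlines_py (content : String) (out : String) : Prop := out = fix_literal_newlines_py_alt content
instance (content : String) (out : String) : Decidable (Spec_fix_literal_newlines_py content out) := by unfold Spec_fix_literal_newlines_py; infer_instance

-- ===== CLAIM =====
def Claim_equal_fix_literal_newlines_py : Prop := ∀ (content : String), Dom_fix_literal_newlines_py content → Spec_fix_literal_newlines_py content (fix_literal_newlines_py content)

-- ===== LEMMAS AND PROOFS =====

-- Proof-only intermediate: a look-ahead scanner; both ports are shown equal to it.
def fixLA (cs : List Char) (inStr : Bool) : List Char :=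
  match cs with
  | [] => []
  | '\\' :: rest =>
    match rest with
    | [] => ['\\']
    | c :: rest' =>
      if c = 'n' ∧ inStr = false then '\n' :: fixLA rest' inStr
      else if c = '\'' then '\'' :: fixLA rest' inStr
      else '\\' :: c :: fixLA rest' inStr
  | c :: rest => c :: fixLA rest (if c = '"' then !inStr else inStr)

-- A's loop in the prev=false state emits acc.reverse followed by the look-ahead scan.
theorem fixA_loop_eq (cs : List Char) (inStr : Bool) (acc : List Char) :
    fixA_loop cs inStr false acc = acc.reverse ++ fixLA cs inStr := by
  match cs with
  | [] => simp [fixA_loop, fixLA]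
  | c :: rest =>
    by_cases hc : c = '\\'
    · subst hc
      match rest with
      | [] => simp [fixA_loop, fixLA]
      | c2 :: rest' =>
        by_cases h1 : c2 = 'n' ∧ inStr = false
        · obtain ⟨ha, hb⟩ := h1
          subst ha; subst hb
          simp [fixA_loop, fixLA, fixA_loop_eq rest' false]
        · by_cases h2 : c2 = '\''
          · simp [fixA_loop, fixLA, h2, fixA_loop_eq rest' inStr]
          · simp [fixA_loop, fixLA, h1, h2, fixA_loop_eq rest' inStr]
    · have hB : fixLA (c :: rest) inStr
          = c :: fixLA rest (if c = '"' then !inStr else inStr) := by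
        cases rest <;> simp [fixLA]
      simp [fixA_loop, hc, hB, fixA_loop_eq rest (if c = '"' then !inStr else inStr)]
termination_by cs.length

theorem parity_succ (n : ℕ) : ((n + 1) % 2 == 1) = !(n % 2 == 1) := by
  rcases Nat.mod_two_eq_zero_or_one n with h | h <;> simp [Nat.add_mod, h]

-- Scanning a backslash-free segment just copies it and flips the state by its quote parity.
theorem fixLA_append_free (seg cs : List Char) (i : Bool) (hfree : '\\' ∉ seg) :
    fixLA (seg ++ cs) i = seg ++ fixLA cs (xor i (seg.count '"' % 2 == 1)) := by
  induction seg generalizing i with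
  | nil => simp
  | cons c t ih =>
    have hc : c ≠ '\\' := fun h => hfree (h ▸ List.mem_cons_self)
    have ht : '\\' ∉ t := fun h => hfree (List.mem_cons_of_mem _ h)
    have hstep : fixLA (c :: (t ++ cs)) i
        = c :: fixLA (t ++ cs) (if c = '"' then !i else i) := by
      cases t ++ cs <;> simp [fixLA, hc]
    rw [List.cons_append, hstep, ih _ ht]
    by_cases hq : c = '"'
    · subst hq
      simp [List.count_cons, parity_succ]
    · simp [List.count_cons, hq]

-- Pieces of splitOn never contain the separator.
theorem not_mem_splitOn (x : Char) (cs : List Char) :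
    ∀ p ∈ cs.splitOn x, x ∉ p := by
  induction cs with
  | nil => intro p hp; simp [List.splitOn, List.splitOnP_nil] at hp; simp [hp]
  | cons c t ih =>
    intro p hp
    simp only [List.splitOn] at hp ih
    rw [List.splitOnP_cons] at hp
    by_cases hc : (c == x) = true
    · simp [hc] at hp
      rcases hp with h | h
      · simp [h]
      · exact ih p h
    · simp [hc] at hp
      obtain ⟨h', t', hsplit⟩ := List.exists_cons_of_ne_nil (List.splitOnP_ne_nil (· == x) t)
      rw [hsplit] at hp
      simp [List.modifyHead] at hp
      rcases hp with h | h
      · subst h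
        intro hmem
        rcases List.mem_cons.mp hmem with h | h
        · exact hc (by simp [h])
        · exact ih h' (by rw [hsplit]; exact List.mem_cons_self) h
      · exact ih p (by rw [hsplit]; exact List.mem_cons_of_mem _ h)

theorem intercalate_cons_flatMap (x : Char) (p0 : List Char) (rest : List (List Char)) :
    [x].intercalate (p0 :: rest) = p0 ++ rest.flatMap (fun p => x :: p) := by
  induction rest generalizing p0 with
  | nil => simp [List.intercalate]
  | cons q rest' ih =>
    have : [x].intercalate (p0 :: q :: rest') = p0 ++ x :: [x].intercalate (q :: rest') := by
      simp [List.intercalate, List.intersperse]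
    rw [this, ih q]
    simp

-- B's fold equals the look-ahead scan of the joined escape-led pieces.
theorem fixBgo_eq (pieces : List (List Char)) (hfree : ∀ p ∈ pieces, '\\' ∉ p) (i : Bool) :
    fixB_go pieces i true = fixLA (pieces.flatMap (fun p => '\\' :: p)) i := by
  match pieces with
  | [] => simp [fixB_go, fixLA]
  | [[]] => simp [fixB_go, fixLA]
  | [] :: q :: rest' =>
    have hq : '\\' ∉ q := hfree q (by simp)
    have hrest' : ∀ r ∈ rest', '\\' ∉ r := fun r hr => hfree r (by simp [hr])
    have ih := fixBgo_eq rest' hrest' (xor i (q.count '"' % 2 == 1))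
    show fixB_go ([] :: q :: rest') i true
        = fixLA ('\\' :: '\\' :: (q ++ rest'.flatMap (fun p => '\\' :: p))) i
    simp only [fixB_go, fixLA]
    rw [fixLA_append_free q _ i hq, ih]
    simp
  | (c :: restP) :: rest =>
    have hrestP : '\\' ∉ restP := fun h => hfree (c :: restP) (by simp) (List.mem_cons_of_mem _ h)
    have hrest : ∀ r ∈ rest, '\\' ∉ r := fun r hr => hfree r (by simp [hr])
    have ihr := fixBgo_eq rest hrest (xor i (restP.count '"' % 2 == 1))
    show fixB_go ((c :: restP) :: rest) i true
        = fixLA ('\\' :: c :: (restP ++ rest.flatMap (fun p => '\\' :: p))) i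
    by_cases h1 : c = 'n' ∧ i = false
    · obtain ⟨ha, hb⟩ := h1; subst ha; subst hb
      simp only [Bool.false_xor] at ihr
      simp [fixB_go, fixLA, fixLA_append_free restP _ false hrestP, ihr]
    · by_cases h2 : c = '\''
      · simp [fixB_go, fixLA, h1, h2, fixLA_append_free restP _ i hrestP, ihr]
      · simp [fixB_go, fixLA, h1, h2, fixLA_append_free restP _ i hrestP, ihr]
termination_by pieces.length

-- ===== VERDICT =====
theorem fix_literal_newlines_py_spec : Claim_equal_fix_literal_newlines_py := by
  intro content _
  unfold Spec_fix_literal_newlines_py fix_literal_newlines_py fix_literal_newlines_py_alt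
  obtain ⟨p0, rest, hsplit⟩ :=
    List.exists_cons_of_ne_nil (List.splitOnP_ne_nil (· == '\\') content.toList)
  have hsplit' : content.toList.splitOn '\\' = p0 :: rest := hsplit
  have hfree := not_mem_splitOn '\\' content.toList
  rw [hsplit'] at hfree
  have hjoin : content.toList = p0 ++ rest.flatMap (fun p => '\\' :: p) := by
    conv_lhs => rw [← List.intercalate_splitOn (xs := content.toList) '\\']
    rw [hsplit', intercalate_cons_flatMap]
  rw [fixA_loop_eq, hsplit']
  show String.ofList ([].reverse ++ fixLA content.toList false)
      = String.ofList (p0 ++ fixB_go rest (p0.count '"' % 2 == 1) true)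
  rw [hjoin, fixLA_append_free p0 _ false (hfree p0 List.mem_cons_self),
    fixBgo_eq rest (fun r hr => hfree r (List.mem_cons_of_mem _ hr))]
  simp
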